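-- pv_equiv track=rewrite | github.com/IRIDIXVdt/auto-iPhone-Store-Cart-Manipulator | FGO_R2/ListTest.py | utk
-- ===== SOURCE A (Python) =====
-- from typing import List
--
-- def utk(items: List[str], keyword: str) -> List[str]:
--     item_bf = []
--
--     for i in items:
--         if i == keyword:
--             break
--         else:
--             item_bf.append(i)
--
--     return item_bf
-- ===== SOURCE B (Python) =====
-- from typing import List
--
-- def utk(items: List[str], keyword: str) -> List[str]:
--     if keyword in items:
--         return items[:items.index(keyword)]
--     return items[:]
-- ===== Notes on version B (the rewrite author's own statement) =====
-- stated objective: simpler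
-- what changed: Replaces the element-by-element accumulation loop with break by a membership test plus index-and-slice (takeWhile via boundary finding).
import Mathlib
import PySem

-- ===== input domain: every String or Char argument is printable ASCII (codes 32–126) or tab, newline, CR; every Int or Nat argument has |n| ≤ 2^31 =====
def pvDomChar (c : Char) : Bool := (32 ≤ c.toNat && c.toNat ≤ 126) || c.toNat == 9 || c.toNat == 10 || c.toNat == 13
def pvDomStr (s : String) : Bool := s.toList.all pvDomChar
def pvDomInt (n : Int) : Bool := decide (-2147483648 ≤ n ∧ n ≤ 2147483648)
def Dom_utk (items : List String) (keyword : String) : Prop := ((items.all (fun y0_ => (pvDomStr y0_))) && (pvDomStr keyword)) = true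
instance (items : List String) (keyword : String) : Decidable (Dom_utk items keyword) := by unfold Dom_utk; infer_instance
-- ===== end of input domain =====

-- B replaces A's accumulate-until-break loop by a membership test plus index-and-slice; objective: simpler.

-- ===== PORT A =====
-- A's for-loop with break, as structural recursion over the list carrying the accumulator item_bf
def utkLoop (keyword : String) : List String → List String → List String
  | [], acc => acc
  | i :: rest, acc => if i = keyword then acc else utkLoop keyword rest (acc ++ [i])

def utk (items : List String) (keyword : String) : List String :=
  utkLoop keyword items []

-- ===== PORT B =====
-- 'if keyword in items: return items[:items.index(keyword)]' / 'return items[:]'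
def utk_alt (items : List String) (keyword : String) : List String :=
  if keyword ∈ items then
    match PySem.List.index? items keyword with
    | some k => items.take k
    | none => []
  else
    items

-- ===== PRECONDITION & SPEC =====
def Spec_utk (items : List String) (keyword : String) (out : List String) : Prop := out = utk_alt items keyword
instance (items : List String) (keyword : String) (out : List String) : Decidable (Spec_utk items keyword out) := by unfold Spec_utk; infer_instance

-- ===== CLAIM (what is proved, stated in full; the proofs are below) =====
def Claim_equal_utk : Prop := ∀ (items : List String) (keyword : String), Dom_utk items keyword → Spec_utk items keyword (utk items keyword)

-- ===== LEMMAS AND PROOFS =====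
theorem utkLoop_acc (keyword : String) (items acc : List String) :
    utkLoop keyword items acc = acc ++ utkLoop keyword items [] := by
  induction items generalizing acc with
  | nil => simp [utkLoop]
  | cons i rest ih =>
    by_cases h : i = keyword
    · simp [utkLoop, h]
    · rw [utkLoop, utkLoop, if_neg h, if_neg h, ih (acc ++ [i]), ih ([] ++ [i]), ih []]
      simp

theorem utk_eq_alt (items : List String) (keyword : String) :
    utk items keyword = utk_alt items keyword := by
  induction items with
  | nil => simp [utk, utkLoop, utk_alt]
  | cons i rest ih =>
    by_cases h : i = keyword
    · subst h
      unfold utk utkLoop utk_alt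
      rw [if_pos rfl, if_pos List.mem_cons_self]
      rw [show PySem.List.index? (i :: rest) i = some 0 from PySem.List.index?_cons_self i rest]
      simp
    · have hrec : utk (i :: rest) keyword = i :: utk rest keyword := by
        show utkLoop keyword (i :: rest) [] = i :: utkLoop keyword rest []
        rw [utkLoop, if_neg h, utkLoop_acc]
        simp
      rw [hrec, ih]
      unfold utk_alt
      have hne : keyword ≠ i := fun hh => h hh.symm
      by_cases hm : keyword ∈ rest
      · have hmem : keyword ∈ i :: rest := List.mem_cons_of_mem _ hm
        rw [if_pos hmem, if_pos hm]
        rw [PySem.List.index?_cons_of_ne rest (fun hh => h hh)]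
        rcases (PySem.List.index?_isSome_iff rest keyword).mpr hm |> Option.isSome_iff_exists.mp with ⟨k, hk⟩
        rw [hk]
        simp
      · have hnm : keyword ∉ i :: rest := by
          intro hc; rcases List.mem_cons.mp hc with hh | hh
          · exact hne hh
          · exact hm hh
        rw [if_neg hnm, if_neg hm]

-- ===== VERDICT (by name: the statement is the Claim_ definition above) =====
theorem utk_spec : Claim_equal_utk := by
  intro items keyword _
  unfold Spec_utk
  exact utk_eq_alt items keyword
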